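-- pv_equiv track=rewrite | github.com/PandaDrunkard/proex | u-tokyo/2015-summer/2.py | to_i
-- ===== SOURCE A (Python) =====
-- def to_i(inp, mod=8):
--     base = 1
--     ret = 0
--
--     for c in reversed(str(inp)):
--         n = int(c)
--         ret += base * n
--         base *= mod
--
--     return ret
-- ===== SOURCE B (Python) =====
-- def to_i(inp, mod=8):
--     ret = 0
--     for c in str(inp):
--         ret = ret * mod + int(c)
--     return ret
-- ===== Notes on version B (the rewrite author's own statement) =====
-- stated objective: idiomatic
-- what changed: Replaces the reversed traversal with an explicit base power by a forward left-to-right Horner multiply-accumulate (ret = ret*mod + digit), dropping the base variable.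
import Mathlib
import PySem

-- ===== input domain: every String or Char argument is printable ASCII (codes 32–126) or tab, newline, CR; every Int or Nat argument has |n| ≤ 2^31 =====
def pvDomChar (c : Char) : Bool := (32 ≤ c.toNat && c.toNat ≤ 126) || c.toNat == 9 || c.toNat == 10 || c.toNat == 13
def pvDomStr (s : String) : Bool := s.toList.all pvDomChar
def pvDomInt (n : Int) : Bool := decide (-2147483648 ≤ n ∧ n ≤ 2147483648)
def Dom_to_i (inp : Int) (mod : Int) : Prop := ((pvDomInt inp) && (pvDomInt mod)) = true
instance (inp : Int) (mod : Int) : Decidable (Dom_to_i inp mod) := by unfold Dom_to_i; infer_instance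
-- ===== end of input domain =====

-- B is an idiomatic forward Horner rewrite of A (return values only; no side effects involved).

-- int(c) for a single character c, as both Pythons do per character
def pvDigit (c : Char) : Int := (PySem.Int.ofStr? (String.mk [c])).getD 0

-- ===== PORT A =====
-- base = 1; ret = 0; for c in reversed(str(inp)): ret += base*int(c); base *= mod
def to_i (inp : Int) (mod : Int) : Int :=
  (((PySem.Int.toStr inp).toList.reverse.foldl
    (fun (st : Int × Int) c => (st.1 * mod, st.2 + st.1 * pvDigit c))
    ((1 : Int), (0 : Int)))).2

-- ===== PORT B =====
-- ret = 0; for c in str(inp): ret = ret*mod + int(c)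
def to_i_alt (inp : Int) (mod : Int) : Int :=
  (PySem.Int.toStr inp).toList.foldl (fun r c => r * mod + pvDigit c) 0

-- ===== PRECONDITION & SPEC =====
-- Pre_ excludes negative inp, where str(inp) starts with '-' and int('-') raises ValueError in both A and B.
def Pre_to_i (inp : Int) (mod : Int) : Prop := 0 ≤ inp
instance (inp : Int) (mod : Int) : Decidable (Pre_to_i inp mod) := by unfold Pre_to_i; infer_instance
def pvWitness_to_i : Int × Int := (123, 8)

def Spec_to_i (inp : Int) (mod : Int) (out : Int) : Prop := out = to_i_alt inp mod
instance (inp : Int) (mod : Int) (out : Int) : Decidable (Spec_to_i inp mod out) := by unfold Spec_to_i; infer_instance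

-- ===== CLAIM (what is proved, stated in full; the proofs are below) =====
def Claim_equal_to_i : Prop := ∀ (inp : Int) (mod : Int), Dom_to_i inp mod → Pre_to_i inp mod → Spec_to_i inp mod (to_i inp mod)

-- ===== LEMMAS AND PROOFS =====

-- Horner accumulator splits off its seed
theorem horner_acc (mod : Int) (l : List Char) (r : Int) :
    l.foldl (fun r c => r * mod + pvDigit c) r
      = r * mod ^ l.length + l.foldl (fun r c => r * mod + pvDigit c) 0 := by
  induction l generalizing r with
  | nil => simp
  | cons c t ih =>
    simp only [List.foldl_cons, List.length_cons]
    rw [ih (r * mod + pvDigit c), ih (0 * mod + pvDigit c)]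
    ring

-- A's loop over the reversed string, as a foldr, computes (mod^len, Horner value)
theorem foldr_pair (mod : Int) (l : List Char) (b r : Int) :
    l.foldr (fun c (st : Int × Int) => (st.1 * mod, st.2 + st.1 * pvDigit c)) (b, r)
      = (b * mod ^ l.length, (l.foldl (fun r c => r * mod + pvDigit c) 0) * b + r) := by
  induction l generalizing b r with
  | nil => simp
  | cons c t ih =>
    simp only [List.foldr_cons, List.foldl_cons, ih, List.length_cons]
    refine Prod.ext ?_ ?_
    · simp [pow_succ]; ring
    · simp only [horner_acc mod t (0 * mod + pvDigit c)]
      ring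

-- ===== VERDICT (by name: the statement is the Claim_ definition above) =====
theorem to_i_spec : Claim_equal_to_i := by
  intro inp mod _ _
  unfold Spec_to_i to_i to_i_alt
  rw [List.foldl_reverse]
  have h := foldr_pair mod (PySem.Int.toStr inp).toList 1 0
  simp only [h]
  ring
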